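-- pv_equiv track=rewrite | github.com/SriLakshmiPolavarapu/python_practice | swap_and_match_goal.py | checkGoal
-- ===== SOURCE A (Python) =====
-- def checkGoal(s, goal):
--     if len(s) != len(goal):
--         return "not buddy string"
--
--     for i in range(len(s) - 1):
--         temp = s[i]
--         s = s[:i] + s[i+1] + temp + s[i+2:]
--
--         if s == goal:
--             return "Buddy String"
--
--     return "not a Buddy String"
-- ===== SOURCE B (Python) =====
-- def checkGoal(s, goal):
--     if len(s) != len(goal):
--         return "not buddy string"
--     arr = list(s)
--     g = list(goal)
--     bad = sum(1 for a, b in zip(arr, g) if a != b)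
--     for i in range(len(arr) - 1):
--         if arr[i] != g[i]:
--             bad -= 1
--         if arr[i + 1] != g[i + 1]:
--             bad -= 1
--         arr[i], arr[i + 1] = arr[i + 1], arr[i]
--         if arr[i] != g[i]:
--             bad += 1
--         if arr[i + 1] != g[i + 1]:
--             bad += 1
--         if bad == 0:
--             return "Buddy String"
--     return "not a Buddy String"
-- ===== Notes on version B (the rewrite author's own statement) =====
-- stated objective: faster
-- what changed: A rebuilds the whole string by slicing and compares it to goal on every iteration (O(n) per step); B swaps adjacent elements in a mutable list and maintains an incremental mismatch counter updated in O(1) per swap, testing equality as counter == 0.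
import Mathlib
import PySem

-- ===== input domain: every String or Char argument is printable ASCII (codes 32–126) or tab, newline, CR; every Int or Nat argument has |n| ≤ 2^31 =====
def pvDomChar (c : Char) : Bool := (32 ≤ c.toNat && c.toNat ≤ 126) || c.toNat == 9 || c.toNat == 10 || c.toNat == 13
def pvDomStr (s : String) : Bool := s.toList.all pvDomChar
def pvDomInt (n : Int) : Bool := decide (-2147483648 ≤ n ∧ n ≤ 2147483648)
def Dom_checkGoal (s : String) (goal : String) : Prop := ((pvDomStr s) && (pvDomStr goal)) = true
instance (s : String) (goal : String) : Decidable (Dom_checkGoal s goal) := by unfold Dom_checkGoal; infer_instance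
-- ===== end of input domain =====

-- B replaces A's quadratic rebuild-and-compare (each step reslices the string and compares
-- the whole string to goal) by an in-place swap with an incremental mismatch counter (O(n)).


-- ===== PORT A =====
-- A's loop: state s is rebuilt each step as s[:i] + s[i+1] + s[i] + s[i+2:] and compared to goal.
-- s[i] / s[i+1] are read with pyGet?; the `.getD ' '` default is never used, since every i the
-- range produces satisfies 0 ≤ i ∧ i + 1 < len(s) (A raises on no input).
def checkGoalGoA (goal : List Char) : List Int → List Char → String
  | [], _ => "not a Buddy String"
  | i :: rest, s =>
    let temp := (PySem.List.pyGet? s i).getD ' '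
    let s' := PySem.List.slice s none (some i) ++
              (PySem.List.pyGet? s (i + 1)).getD ' ' :: temp ::
              PySem.List.slice s (some (i + 2)) none
    if s' = goal then "Buddy String" else checkGoalGoA goal rest s'

def checkGoal (s : String) (goal : String) : String :=
  if PySem.Str.len s ≠ PySem.Str.len goal then "not buddy string"
  else checkGoalGoA goal.toList (PySem.List.pyRange 0 (PySem.Str.len s - 1)) s.toList

-- ===== PORT B =====
-- B's loop: arr is swapped in place (List.set at i.toNat is exact: every i produced by the range
-- is ≥ 0 and i+1 < len(arr)); bad is the running mismatch count against goal.
def checkGoalGoB (g : List Char) : List Int → List Char → Int → String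
  | [], _, _ => "not a Buddy String"
  | i :: rest, arr, bad =>
    let gi := (PySem.List.pyGet? g i).getD ' '
    let gi1 := (PySem.List.pyGet? g (i + 1)).getD ' '
    let bad1 := if (PySem.List.pyGet? arr i).getD ' ' ≠ gi then bad - 1 else bad
    let bad2 := if (PySem.List.pyGet? arr (i + 1)).getD ' ' ≠ gi1 then bad1 - 1 else bad1
    let arr' := (arr.set i.toNat ((PySem.List.pyGet? arr (i + 1)).getD ' ')).set (i.toNat + 1)
                  ((PySem.List.pyGet? arr i).getD ' ')
    let bad3 := if (PySem.List.pyGet? arr' i).getD ' ' ≠ gi then bad2 + 1 else bad2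
    let bad4 := if (PySem.List.pyGet? arr' (i + 1)).getD ' ' ≠ gi1 then bad3 + 1 else bad3
    if bad4 = 0 then "Buddy String" else checkGoalGoB g rest arr' bad4

def checkGoal_alt (s : String) (goal : String) : String :=
  if PySem.Str.len s ≠ PySem.Str.len goal then "not buddy string"
  else
    let arr := s.toList
    let g := goal.toList
    let bad := (arr.zip g).foldl (fun acc p => if p.1 ≠ p.2 then acc + 1 else acc) (0 : Int)
    checkGoalGoB g (PySem.List.pyRange 0 ((arr.length : Int) - 1)) arr bad

-- ===== PRECONDITION & SPEC =====
def Spec_checkGoal (s : String) (goal : String) (out : String) : Prop := out = checkGoal_alt s goal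
instance (s : String) (goal : String) (out : String) : Decidable (Spec_checkGoal s goal out) := by unfold Spec_checkGoal; infer_instance

-- ===== CLAIM (what is proved, stated in full; the proofs are below) =====
def Claim_equal_checkGoal : Prop := ∀ (s : String) (goal : String), Dom_checkGoal s goal → Spec_checkGoal s goal (checkGoal s goal)

-- ===== LEMMAS AND PROOFS =====

-- number of positions where the two lists differ (Int-valued, as B's counter)
def pvMism (a g : List Char) : Int := ((a.zip g).countP (fun p => p.1 ≠ p.2) : Nat)

lemma pvMism_cons (a c : Char) (as cs : List Char) :
    pvMism (a :: as) (c :: cs) = (if a ≠ c then 1 else 0) + pvMism as cs := by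
  by_cases h : a = c
  · simp [pvMism, List.zip_cons_cons, h]
  · simp only [pvMism, List.zip_cons_cons, List.countP_cons, h, if_pos, ne_eq,
      not_false_eq_true, decide_true]
    push_cast
    omega

lemma pvMism_eq_zero_iff : ∀ (a g : List Char), a.length = g.length → (pvMism a g = 0 ↔ a = g)
  | [], [], _ => by simp [pvMism]
  | a :: as, c :: cs, h => by
    have ih := pvMism_eq_zero_iff as cs (by simpa using h)
    rw [pvMism_cons]
    have hnn : 0 ≤ pvMism as cs := by simp [pvMism]
    by_cases hac : a = c
    · subst hac
      simpa using ih
    · rw [if_pos hac]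
      constructor
      · intro h0; exact absurd h0 (by omega)
      · intro he; injection he with h1 _; exact absurd h1 hac

lemma pvMism_set : ∀ (k : Nat) (arr g : List Char) (x : Char) (h1 : k < arr.length) (h2 : k < g.length),
    pvMism (arr.set k x) g =
      pvMism arr g - (if arr[k] ≠ g[k] then 1 else 0) + (if x ≠ g[k] then 1 else 0)
  | 0, a :: as, c :: cs, x, _, _ => by
    simp only [List.set_cons_zero, pvMism_cons, List.getElem_cons_zero]
    split_ifs <;> omega
  | k + 1, a :: as, c :: cs, x, h1, h2 => by
    simp only [List.set_cons_succ, pvMism_cons, List.getElem_cons_succ]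
    rw [pvMism_set k as cs x (by simpa using h1) (by simpa using h2)]
    split_ifs <;> omega

lemma pvSwap_eq : ∀ (k : Nat) (arr : List Char) (h : k + 1 < arr.length),
    arr.take k ++ arr[k + 1] :: arr[k] :: arr.drop (k + 2) =
      (arr.set k arr[k + 1]).set (k + 1) arr[k]
  | 0, a :: b :: t, _ => by simp
  | k + 1, a :: t, h => by
    have ht : k + 1 < t.length := by simpa using h
    simp only [List.take_succ_cons, List.getElem_cons_succ, List.drop_succ_cons,
      List.set_cons_succ, List.cons_append]
    rw [pvSwap_eq k t ht]

lemma pvGet_nat (l : List Char) (k : Nat) (h : k < l.length) :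
    (PySem.List.pyGet? l (k : Int)).getD ' ' = l[k] := by
  rw [PySem.List.pyGet?_natCast, List.getElem?_eq_getElem h]
  rfl

-- B's four counter updates, over abstract conditions
lemma pvBadStep (bad : Int) (p1 p2 p3 p4 : Prop)
    [Decidable p1] [Decidable p2] [Decidable p3] [Decidable p4] :
    (if p4 then
        (if p3 then
            (if p2 then (if p1 then bad - 1 else bad) - 1 else (if p1 then bad - 1 else bad)) + 1
          else
            (if p2 then (if p1 then bad - 1 else bad) - 1 else (if p1 then bad - 1 else bad))) + 1
      else
        (if p3 then
            (if p2 then (if p1 then bad - 1 else bad) - 1 else (if p1 then bad - 1 else bad)) + 1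
          else
            (if p2 then (if p1 then bad - 1 else bad) - 1 else (if p1 then bad - 1 else bad)))) =
      bad - (if p1 then 1 else 0) - (if p2 then 1 else 0) +
        (if p3 then 1 else 0) + (if p4 then 1 else 0) := by
  split_ifs <;> omega

lemma pvGo_eq (g : List Char) :
    ∀ (l : List Int) (arr : List Char) (bad : Int),
      arr.length = g.length →
      (∀ i ∈ l, 0 ≤ i ∧ i.toNat + 1 < arr.length) →
      bad = pvMism arr g →
      checkGoalGoA g l arr = checkGoalGoB g l arr bad
  | [], arr, bad, _, _, _ => rfl
  | i :: rest, arr, bad, hlen, hmem, hbad => by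
    obtain ⟨hi0, hi1⟩ := hmem i (List.mem_cons_self ..)
    obtain ⟨k, rfl⟩ : ∃ k : Nat, i = (k : Int) := ⟨i.toNat, by omega⟩
    have hk1 : k + 1 < arr.length := by simpa using hi1
    have hkg : k + 1 < g.length := hlen ▸ hk1
    have hcast : ((k : Int) + 1) = ((k + 1 : Nat) : Int) := by push_cast; ring
    have hgA : (PySem.List.pyGet? arr (k : Int)).getD ' ' = arr[k] := pvGet_nat arr k (by omega)
    have hgA1 : (PySem.List.pyGet? arr ((k : Int) + 1)).getD ' ' = arr[k + 1] := by
      rw [hcast]; exact pvGet_nat arr (k + 1) hk1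
    have hgG : (PySem.List.pyGet? g (k : Int)).getD ' ' = g[k] := pvGet_nat g k (by omega)
    have hgG1 : (PySem.List.pyGet? g ((k : Int) + 1)).getD ' ' = g[k + 1] := by
      rw [hcast]; exact pvGet_nat g (k + 1) hkg
    have hlen' : ((arr.set k arr[k + 1]).set (k + 1) arr[k]).length = arr.length := by simp
    have hgA' : (PySem.List.pyGet? ((arr.set k arr[k + 1]).set (k + 1) arr[k]) (k : Int)).getD ' ' =
        arr[k + 1] := by
      rw [pvGet_nat _ k (by rw [hlen']; omega)]
      simp
    have hgA1' : (PySem.List.pyGet? ((arr.set k arr[k + 1]).set (k + 1) arr[k]) ((k : Int) + 1)).getD ' ' =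
        arr[k] := by
      rw [hcast, pvGet_nat _ (k + 1) (by rw [hlen']; omega)]
      simp
    -- A's rebuilt string is the in-place swap
    have hsA : PySem.List.slice arr none (some (k : Int)) ++
        arr[k + 1] :: arr[k] :: PySem.List.slice arr (some ((k : Int) + 2)) none =
        (arr.set k arr[k + 1]).set (k + 1) arr[k] := by
      rw [PySem.List.slice_to arr (by positivity : (0 : Int) ≤ (k : Int)),
        PySem.List.slice_from arr (by positivity : (0 : Int) ≤ (k : Int) + 2),
        Int.toNat_natCast, show ((k : Int) + 2).toNat = k + 2 by omega]
      exact pvSwap_eq k arr hk1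
    -- the counter after the step equals the mismatch count of the swapped array
    have hmset1 := pvMism_set k arr g arr[k + 1] (by omega) (by omega)
    have hmset2 := pvMism_set (k + 1) (arr.set k arr[k + 1]) g arr[k] (by simpa using hk1) hkg
    have hmid : (arr.set k arr[k + 1])[k + 1]'(by simpa using hk1) = arr[k + 1] := by
      simp
    have hm : pvMism ((arr.set k arr[k + 1]).set (k + 1) arr[k]) g =
        bad - (if arr[k] ≠ g[k] then 1 else 0) - (if arr[k + 1] ≠ g[k + 1] then 1 else 0) +
          (if arr[k + 1] ≠ g[k] then 1 else 0) + (if arr[k] ≠ g[k + 1] then 1 else 0) := by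
      rw [hmset2, hmid, hmset1, hbad]
      split_ifs <;> omega
    simp only [checkGoalGoA, checkGoalGoB, hgA, hgA1, hgG, hgG1, Int.toNat_natCast]
    simp only [hgA', hgA1', hsA]
    rw [pvBadStep, ← hm]
    have hiff : ((arr.set k arr[k + 1]).set (k + 1) arr[k]) = g ↔
        pvMism ((arr.set k arr[k + 1]).set (k + 1) arr[k]) g = 0 :=
      (pvMism_eq_zero_iff _ g (by rw [hlen', hlen])).symm
    by_cases hc : pvMism ((arr.set k arr[k + 1]).set (k + 1) arr[k]) g = 0
    · rw [if_pos (hiff.mpr hc), if_pos hc]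
    · rw [if_neg (fun h => hc (hiff.mp h)), if_neg hc]
      exact pvGo_eq g rest _ _ (by rw [hlen', hlen])
        (fun j hj => by
          obtain ⟨h0, h1⟩ := hmem j (List.mem_cons_of_mem _ hj)
          exact ⟨h0, by rw [hlen']; omega⟩)
        rfl

-- ===== VERDICT (by name: the statement is the Claim_ definition above) =====
theorem checkGoal_spec : Claim_equal_checkGoal := by
  intro s goal _
  unfold Spec_checkGoal checkGoal checkGoal_alt
  by_cases hlen : PySem.Str.len s ≠ PySem.Str.len goal
  · rw [if_pos hlen, if_pos hlen]
  · rw [if_neg hlen, if_neg hlen]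
    rw [not_ne_iff] at hlen
    rw [PySem.Str.len_eq, PySem.Str.len_eq] at hlen
    have hlen' : s.toList.length = goal.toList.length := by exact_mod_cast hlen
    have hinit : (s.toList.zip goal.toList).foldl
        (fun acc p => if p.1 ≠ p.2 then acc + 1 else acc) (0 : Int) =
        pvMism s.toList goal.toList := by
      simpa [pvMism] using
        PySem.List.foldl_count_if (fun p : Char × Char => decide (p.1 ≠ p.2))
          (s.toList.zip goal.toList) 0
    rw [PySem.Str.len_eq]
    dsimp only
    rw [hinit]
    exact pvGo_eq goal.toList _ s.toList _ hlen'
      (fun i hi => by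
        have := PySem.List.mem_pyRange_one.mp hi
        constructor
        · exact this.1
        · omega)
      rfl
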